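-- pv_equiv track=rewrite | github.com/JonathanRhymond/Introduction-to-Computer-Programming-in-Python | 1224_Homework2_Rhymond.py | anti_identity
-- ===== SOURCE A (Python) =====
-- def anti_identity(n):
--     result = []
--     for row in range(n):
--         result.append([0]*n)
--     for i in range(n):
--         result[i][n-1] += 1
--         n -= 1
--     return result
-- ===== SOURCE B (Python) =====
-- def anti_identity(n):
--     # Sliding-window slicing: one shared template row with a single 1 in the
--     # middle; row i is the length-n window of it starting at offset i.
--     if n <= 0:
--         return []
--     big = [0] * (n - 1) + [1] + [0] * (n - 1)
--     return [big[i:i + n] for i in range(n)]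
-- ===== Notes on version B (the rewrite author's own statement) =====
-- stated objective: alternative
-- what changed: B builds one shared template list [0]*(n-1)+[1]+[0]*(n-1) and takes each row as the sliding length-n slice big[i:i+n], instead of A's zero-matrix allocation followed by a second mutation pass over the anti-diagonal with a decremented n.
import Mathlib
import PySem

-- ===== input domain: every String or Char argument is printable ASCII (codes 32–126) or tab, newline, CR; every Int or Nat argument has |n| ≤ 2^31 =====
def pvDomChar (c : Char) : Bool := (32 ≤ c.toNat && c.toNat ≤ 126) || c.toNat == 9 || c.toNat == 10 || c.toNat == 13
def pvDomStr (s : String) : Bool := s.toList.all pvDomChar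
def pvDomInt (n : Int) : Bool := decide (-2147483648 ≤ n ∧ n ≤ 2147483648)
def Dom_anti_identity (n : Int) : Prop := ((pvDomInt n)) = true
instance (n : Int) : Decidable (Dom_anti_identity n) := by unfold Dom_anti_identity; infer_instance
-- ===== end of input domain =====

-- B builds the anti-diagonal identity matrix from one shared template row sliced with a
-- sliding window, instead of A's zero-matrix allocation followed by a second mutation pass.

-- ===== PORT A =====
-- Literal port of A: first loop appends [0]*n rows; second loop does result[i][n-1] += 1; n -= 1.
-- All indices in the second loop are in range (0 ≤ i < n and the current n-1 satisfies 0 ≤ n-1),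
-- so the total forms pyGetD/pySetD are exact here.
def anti_identity (n : Int) : List (List Int) :=
  let result : List (List Int) :=
    (PySem.List.pyRange 0 n 1).foldl (fun acc _ => acc ++ [PySem.List.pyRepeat [(0 : Int)] n]) []
  ((PySem.List.pyRange 0 n 1).foldl
    (fun (st : List (List Int) × Int) i =>
      let row := PySem.List.pyGetD st.1 i []
      (PySem.List.pySetD st.1 i
        (PySem.List.pySetD row (st.2 - 1) (PySem.List.pyGetD row (st.2 - 1) 0 + 1)),
       st.2 - 1))
    (result, n)).1

-- ===== PORT B =====
-- Literal port of B: template list [0]*(n-1)+[1]+[0]*(n-1); row i = big[i:i+n].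
def anti_identity_alt (n : Int) : List (List Int) :=
  if n ≤ 0 then []
  else
    let big : List Int :=
      PySem.List.pyRepeat [(0 : Int)] (n - 1) ++ [1] ++ PySem.List.pyRepeat [(0 : Int)] (n - 1)
    (PySem.List.pyRange 0 n 1).map (fun i => PySem.List.slice big (some i) (some (i + n)))

-- ===== PRECONDITION & SPEC =====
def Spec_anti_identity (n : Int) (out : List (List Int)) : Prop := out = anti_identity_alt n
instance (n : Int) (out : List (List Int)) : Decidable (Spec_anti_identity n out) := by unfold Spec_anti_identity; infer_instance

-- ===== CLAIM (what is proved, stated in full; the proofs are below) =====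
def Claim_equal_anti_identity : Prop := ∀ (n : Int), Dom_anti_identity n → Spec_anti_identity n (anti_identity n)

-- ===== LEMMAS AND PROOFS =====

def pvZrow (N : Nat) : List Int := List.replicate N 0

def pvOnehot (N i : Nat) : List Int := (pvZrow N).set (N - 1 - i) 1

def pvTgt (N k : Nat) : List (List Int) :=
  (List.range N).map (fun i => if i < k then pvOnehot N i else pvZrow N)

theorem pv_foldl_append_const {α β : Type} (l : List α) (c : β) (acc : List β) :
    l.foldl (fun acc _ => acc ++ [c]) acc = acc ++ List.replicate l.length c := by
  induction l generalizing acc with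
  | nil => simp
  | cons x xs ih => rw [List.foldl_cons, ih, List.append_assoc]; rfl

theorem pv_first_loop (n : Int) :
    (PySem.List.pyRange 0 n 1).foldl
      (fun acc _ => acc ++ [PySem.List.pyRepeat [(0 : Int)] n]) [] =
    List.replicate n.toNat (pvZrow n.toNat) := by
  rw [pv_foldl_append_const, PySem.List.pyRepeat_singleton]
  simp [PySem.List.length_pyRange_one, pvZrow]

theorem pv_tgt_zero (N : Nat) : pvTgt N 0 = List.replicate N (pvZrow N) := by
  simp [pvTgt]

theorem pv_tgt_step (N k : Nat) (_hk : k < N) :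
    (pvTgt N k).set k (pvOnehot N k) = pvTgt N (k + 1) := by
  apply List.ext_getElem
  · simp [pvTgt]
  · intro j h1 h2
    simp only [pvTgt, List.length_map, List.length_range] at h1 h2 ⊢
    rw [List.getElem_set]
    simp only [List.getElem_map, List.getElem_range]
    split_ifs with hjk h3 h4 h5 h6
    all_goals (try subst hjk)
    all_goals first | rfl | omega

theorem pv_second_loop (N : Nat) (k : Nat) (hk : k ≤ N) :
    (PySem.List.pyRange 0 (k : Int) 1).foldl
      (fun (st : List (List Int) × Int) i =>
        let row := PySem.List.pyGetD st.1 i []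
        (PySem.List.pySetD st.1 i
          (PySem.List.pySetD row (st.2 - 1) (PySem.List.pyGetD row (st.2 - 1) 0 + 1)),
         st.2 - 1))
      (List.replicate N (pvZrow N), (N : Int)) = (pvTgt N k, ((N : Int) - k)) := by
  induction k with
  | zero =>
    rw [PySem.List.pyRange_one_eq_nil (by omega)]
    simp [pv_tgt_zero]
  | succ k ih =>
    have hk' : k ≤ N := by omega
    rw [show ((k + 1 : Nat) : Int) = (k : Int) + 1 by push_cast; ring,
        PySem.List.pyRange_one_succ_right (by omega), List.foldl_append, ih hk']
    simp only [List.foldl]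
    have hkN : k < N := by omega
    have hget : PySem.List.pyGetD (pvTgt N k) (k : Int) [] = pvZrow N := by
      rw [PySem.List.pyGetD_eq_getElem _ _ (by omega)
            (by simp [pvTgt]; omega)]
      simp [pvTgt]
    have hidx : ((N : Int) - k - 1) = ((N - 1 - k : Nat) : Int) := by omega
    have hval : PySem.List.pyGetD (pvZrow N) ((N : Int) - k - 1) 0 = 0 := by
      rw [hidx, PySem.List.pyGetD_eq_getElem _ _ (by omega)
            (by simp [pvZrow]; omega)]
      simp [pvZrow]
    have hset : PySem.List.pySetD (pvZrow N) ((N : Int) - k - 1) (0 + 1) = pvOnehot N k := by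
      rw [hidx, PySem.List.pySetD_of_nonneg _ _ (by omega)]
      simp [pvOnehot]
    have houter : PySem.List.pySetD (pvTgt N k) (k : Int) (pvOnehot N k) = pvTgt N (k + 1) := by
      rw [PySem.List.pySetD_of_nonneg _ _ (by omega)]
      simpa using pv_tgt_step N k hkN
    rw [hget, hval, hset, houter]
    have : (N : Int) - k - 1 = (N : Int) - ((k : Int) + 1) := by ring
    rw [this]

theorem pv_big_get (N k : Nat) (h : k < 2 * N - 1) :
    (List.replicate (N - 1) (0 : Int) ++ [1] ++ List.replicate (N - 1) 0)[k]'(by simp; omega) =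
      if k = N - 1 then 1 else 0 := by
  by_cases h1 : k < N - 1
  · rw [List.getElem_append_left (by simp; omega), List.getElem_append_left (by simp; omega),
        List.getElem_replicate, if_neg (by omega)]
  · by_cases h2 : k = N - 1
    · subst h2
      rw [List.getElem_append_left (by simp),
          List.getElem_append_right (by simp), if_pos rfl]
      simp
    · rw [List.getElem_append_right (by simp; omega), List.getElem_replicate, if_neg h2]

theorem pv_row_slice (N i : Nat) (hi : i < N) :
    PySem.List.slice
      (List.replicate (N - 1) (0 : Int) ++ [1] ++ List.replicate (N - 1) 0)
      (some (i : Int)) (some ((i : Int) + (N : Int))) = pvOnehot N i := by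
  have hlen : (List.replicate (N - 1) (0 : Int) ++ [1] ++ List.replicate (N - 1) 0).length
      = 2 * N - 1 := by simp; omega
  rw [show ((i : Int) + (N : Int)) = (((i + N : Nat) : Int)) by push_cast; ring,
      PySem.List.slice_natCast]
  apply List.ext_getElem
  · simp [pvOnehot, pvZrow]; omega
  · intro j h1 h2
    have hj : j < N := by
      simp only [List.length_take, List.length_drop, hlen] at h1; omega
    rw [List.getElem_take, List.getElem_drop]
    have hkey := pv_big_get N (i + j) (by omega)
    rw [hkey]
    simp only [pvOnehot, pvZrow] at h2 ⊢
    rw [List.getElem_set]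
    split_ifs with ha hb hc
    · rfl
    · omega
    · omega
    · rw [List.getElem_replicate]

theorem pv_alt_eq (N : Nat) (hN : 0 < N) :
    anti_identity_alt (N : Int) = pvTgt N N := by
  unfold anti_identity_alt
  rw [if_neg (by omega)]
  simp only []
  have hcast : ((N : Int) - 1) = ((N - 1 : Nat) : Int) := by omega
  rw [hcast, PySem.List.pyRepeat_singleton]
  apply List.ext_getElem
  · simp [PySem.List.length_pyRange_one, pvTgt]
  · intro i h1 h2
    have hi : i < N := by
      simpa [PySem.List.length_pyRange_one] using h1
    simp only [List.getElem_map, PySem.List.getElem_pyRange_one, zero_add]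
    simp only [pvTgt, List.getElem_map, List.getElem_range]
    rw [if_pos hi]
    have := pv_row_slice N i hi
    simpa using this

-- ===== VERDICT (by name: the statement is the Claim_ definition above) =====
theorem anti_identity_spec : Claim_equal_anti_identity := by
  intro n _
  unfold Spec_anti_identity
  by_cases hn : n ≤ 0
  · unfold anti_identity anti_identity_alt
    rw [if_pos hn, PySem.List.pyRange_one_eq_nil (by omega)]
    simp
  · rw [not_le] at hn
    have hN : n = (n.toNat : Int) := by omega
    rw [hN, pv_alt_eq _ (by omega)]
    unfold anti_identity
    simp only []
    rw [pv_first_loop]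
    have := pv_second_loop n.toNat n.toNat le_rfl
    rw [show ((n.toNat : Int)).toNat = n.toNat by omega] at *
    rw [this]
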